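-- pv_equiv track=rewrite | github.com/emersonfelipesp/netbox-sdk | netbox_tui/cli_tui.py | _merge_wrapped_box_rows
-- ===== SOURCE A (Python) =====
-- def _merge_wrapped_box_rows(rows: list[list[str]]) -> list[list[str]]:
--     if not rows:
--         return rows
--
--     width = len(rows[0])
--     normalized_rows: list[list[str]] = []
--     for row in rows:
--         normalized = list(row[:width])
--         if len(normalized) < width:
--             normalized.extend([""] * (width - len(normalized)))
--         normalized_rows.append(normalized)
--
--     merged: list[list[str]] = [normalized_rows[0]]
--     for row in normalized_rows[1:]:
--         non_empty = [index for index, cell in enumerate(row) if cell]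
--         if non_empty and len(non_empty) < width and len(non_empty) <= 2:
--             prev = merged[-1]
--             for index in non_empty:
--                 prev[index] = f"{prev[index]}<br>{row[index]}" if prev[index] else row[index]
--         else:
--             merged.append(row)
--     return merged
-- ===== SOURCE B (Python) =====
-- def _merge_wrapped_box_rows(rows: list[list[str]]) -> list[list[str]]:
--     if not rows:
--         return rows
--
--     width = len(rows[0])
--     norm = [row[:width] + [""] * (width - len(row[:width])) for row in rows]
--
--     # Pass 1: partition into groups; the first row anchors group 0, each later
--     # row is a continuation iff it has 1..2 non-empty cells and fewer than width.
--     groups = [[norm[0]]]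
--     for r in norm[1:]:
--         k = sum(1 for c in r if c)
--         if 0 < k < width and k <= 2:
--             groups[-1].append(r)
--         else:
--             groups.append([r])
--
--     # Pass 2: render each group by folding its continuations into the head.
--     out = []
--     for g in groups:
--         head = g[0]
--         for cont in g[1:]:
--             head = [((f"{h}<br>{c}" if h else c) if c else h)
--                     for h, c in zip(head, cont)]
--         out.append(head)
--     return out
-- ===== Notes on version B (the rewrite author's own statement) =====
-- stated objective: alternative
-- what changed: Two-pass decomposition: first partition normalized rows into head+continuation groups, then render each group by zipping continuations into the head cell-wise, instead of A's single pass that mutates the last merged row at per-index positions.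
import Mathlib
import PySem

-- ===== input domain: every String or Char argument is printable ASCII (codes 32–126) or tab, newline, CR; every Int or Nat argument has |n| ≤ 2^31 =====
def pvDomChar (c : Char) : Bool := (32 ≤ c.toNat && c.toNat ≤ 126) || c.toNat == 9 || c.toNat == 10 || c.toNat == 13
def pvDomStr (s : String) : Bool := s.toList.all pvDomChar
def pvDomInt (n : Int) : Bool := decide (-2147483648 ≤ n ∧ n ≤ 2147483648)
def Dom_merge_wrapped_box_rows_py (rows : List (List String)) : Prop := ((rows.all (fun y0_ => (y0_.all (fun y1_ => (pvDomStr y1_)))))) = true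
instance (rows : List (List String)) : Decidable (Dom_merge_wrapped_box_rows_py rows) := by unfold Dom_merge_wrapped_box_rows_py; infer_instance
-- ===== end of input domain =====

-- B is an alternative decomposition of A (partition into groups, then render each group);
-- same cost, proved to return the same value on every input; neither version mutates its argument.

-- ===== PORT A =====
-- hand port of the comprehension `[index for index, cell in enumerate(row) if cell]`
-- (exact: the 0-based indices of the non-empty cells, in order)
def pvNonEmptyA : List String → Nat → List Nat
  | [], _ => []
  | c :: t, i => if c ≠ "" then i :: pvNonEmptyA t (i + 1) else pvNonEmptyA t (i + 1)

-- the inner `for index in non_empty: prev[index] = ...` loop; every index is in range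
-- in A (indices < width = len(prev)), so getD/set are exact here
def pvMergeIntoA (prev row : List String) (idxs : List Nat) : List String :=
  idxs.foldl (fun p i =>
    p.set i (if p.getD i "" ≠ "" then p.getD i "" ++ "<br>" ++ row.getD i "" else row.getD i "")) prev

def merge_wrapped_box_rows_py (rows : List (List String)) : List (List String) :=
  match rows with
  | [] => []
  | r0 :: _ =>
    let width := r0.length
    let normalized_rows := rows.foldl (fun acc row =>
      let normalized := row.take width
      let normalized := normalized ++ List.replicate (width - normalized.length) ""
      acc ++ [normalized]) []
    match normalized_rows with
    | [] => []
    | n0 :: rest =>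
      rest.foldl (fun merged row =>
        let ne := pvNonEmptyA row 0
        if ne ≠ [] ∧ ne.length < width ∧ ne.length ≤ 2 then
          merged.dropLast ++ [pvMergeIntoA (merged.getLastD []) row ne]
        else merged ++ [row]) [n0]

-- ===== PORT B =====
-- `(f"{h}<br>{c}" if h else c) if c else h`
def pvCombineB (h c : String) : String :=
  if c ≠ "" then (if h ≠ "" then h ++ "<br>" ++ c else c) else h

-- `sum(1 for c in r if c)`
def pvCountB (r : List String) : Nat := (r.filter (fun c => c ≠ "")).length

-- render one group: fold its continuations into the head, cell-wise
def pvRenderB (g : List (List String)) : List String :=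
  (g.drop 1).foldl (fun head cont => List.zipWith pvCombineB head cont) (g.headD [])

def merge_wrapped_box_rows_py_alt (rows : List (List String)) : List (List String) :=
  match rows with
  | [] => []
  | r0 :: _ =>
    let width := r0.length
    let norm := rows.map (fun row => row.take width ++ List.replicate (width - (row.take width).length) "")
    match norm with
    | [] => []
    | n0 :: rest =>
      let groups := rest.foldl (fun gs r =>
        let k := pvCountB r
        if 0 < k ∧ k < width ∧ k ≤ 2 then gs.dropLast ++ [gs.getLastD [] ++ [r]]
        else gs ++ [[r]]) [[n0]]
      groups.map pvRenderB

-- ===== PRECONDITION & SPEC =====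
def Spec_merge_wrapped_box_rows_py (rows : List (List String)) (out : List (List String)) : Prop := out = merge_wrapped_box_rows_py_alt rows
instance (rows : List (List String)) (out : List (List String)) : Decidable (Spec_merge_wrapped_box_rows_py rows out) := by unfold Spec_merge_wrapped_box_rows_py; infer_instance

-- ===== CLAIM (what is proved, stated in full; the proofs are below) =====
def Claim_equal_merge_wrapped_box_rows_py : Prop := ∀ (rows : List (List String)), Dom_merge_wrapped_box_rows_py rows → Spec_merge_wrapped_box_rows_py rows (merge_wrapped_box_rows_py rows)

-- ===== LEMMAS AND PROOFS =====

theorem pvNonEmptyA_shift (t : List String) (i : Nat) :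
    pvNonEmptyA t (i + 1) = (pvNonEmptyA t i).map (· + 1) := by
  induction t generalizing i with
  | nil => simp [pvNonEmptyA]
  | cons c t ih =>
    simp only [pvNonEmptyA]
    split <;> simp [ih]

theorem pvNonEmptyA_length (t : List String) (i : Nat) :
    (pvNonEmptyA t i).length = pvCountB t := by
  induction t generalizing i with
  | nil => simp [pvNonEmptyA, pvCountB]
  | cons c t ih =>
    simp only [pvNonEmptyA, pvCountB, List.filter_cons]
    split <;> simp_all [pvCountB]

theorem foldl_set_shift (rt : List String) (h : String) (pt : List String) (is : List Nat) :
    (is.map (· + 1)).foldl (fun p i =>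
        p.set i (if p.getD i "" ≠ "" then p.getD i "" ++ "<br>" ++ rt.getD (i - 1) "" else rt.getD (i - 1) "")) (h :: pt)
    = h :: is.foldl (fun p i =>
        p.set i (if p.getD i "" ≠ "" then p.getD i "" ++ "<br>" ++ rt.getD i "" else rt.getD i "")) pt := by
  induction is generalizing pt with
  | nil => simp
  | cons i is ih =>
    simp only [List.map_cons, List.foldl_cons, List.set_cons_succ, List.getD_cons_succ,
      Nat.add_sub_cancel]
    exact ih _

-- core: the per-index mutation loop of A equals B's zipWith, when lengths agree
theorem pvMergeIntoA_eq_zipWith (row prev : List String) (hlen : prev.length = row.length) :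
    pvMergeIntoA prev row (pvNonEmptyA row 0) = List.zipWith pvCombineB prev row := by
  induction row generalizing prev with
  | nil =>
    cases prev with
    | nil => simp [pvMergeIntoA, pvNonEmptyA]
    | cons _ _ => simp at hlen
  | cons c rt ih =>
    cases prev with
    | nil => simp at hlen
    | cons h pt =>
      simp only [List.length_cons, Nat.succ_inj] at hlen
      have hshift := pvNonEmptyA_shift rt 0
      have hcongr : ∀ p : List String,
          List.foldl (fun p i => p.set i (if p.getD i "" ≠ "" then
              p.getD i "" ++ "<br>" ++ (c :: rt).getD i "" else (c :: rt).getD i "")) p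
            ((pvNonEmptyA rt 0).map (· + 1))
        = List.foldl (fun p i => p.set i (if p.getD i "" ≠ "" then
              p.getD i "" ++ "<br>" ++ rt.getD (i - 1) "" else rt.getD (i - 1) "")) p
            ((pvNonEmptyA rt 0).map (· + 1)) := by
        intro p
        apply List.foldl_ext
        intro p' i hi
        rcases List.mem_map.mp hi with ⟨j, _, rfl⟩
        simp [Nat.add_sub_cancel]
      simp only [pvMergeIntoA] at ih ⊢
      by_cases hc : c = ""
      · rw [show pvNonEmptyA (c :: rt) 0 = pvNonEmptyA rt (0 + 1) from by
          simp [pvNonEmptyA, hc]]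
        rw [hshift, hcongr, foldl_set_shift, ih pt hlen]
        simp [pvCombineB, hc]
      · rw [show pvNonEmptyA (c :: rt) 0 = 0 :: pvNonEmptyA rt (0 + 1) from by
          simp [pvNonEmptyA, hc]]
        rw [List.foldl_cons]
        simp only [List.getD_cons_zero, List.set_cons_zero]
        rw [hshift, hcongr, foldl_set_shift, ih pt hlen]
        simp [pvCombineB, hc]

theorem pvRenderB_singleton (r : List String) : pvRenderB [r] = r := by
  simp [pvRenderB]

theorem pvRenderB_append (g : List (List String)) (r : List String) (hg : g ≠ []) :
    pvRenderB (g ++ [r]) = List.zipWith pvCombineB (pvRenderB g) r := by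
  cases g with
  | nil => exact absurd rfl hg
  | cons h t => simp [pvRenderB, List.foldl_append]

theorem foldl_zip_length (w : Nat) (t : List (List String)) :
    ∀ h : List String, h.length = w → (∀ r ∈ t, r.length = w) →
    (t.foldl (fun head cont => List.zipWith pvCombineB head cont) h).length = w := by
  induction t with
  | nil => intro h hh _; simpa using hh
  | cons c t ih =>
    intro h hh hw
    simp only [List.foldl_cons]
    apply ih
    · rw [List.length_zipWith, hh, hw c (by simp)]; simp
    · intro r hr; exact hw r (by simp [hr])

theorem pvRenderB_length (g : List (List String)) (w : Nat)
    (hg : g ≠ []) (hw : ∀ r ∈ g, r.length = w) : (pvRenderB g).length = w := by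
  cases g with
  | nil => exact absurd rfl hg
  | cons h t =>
    simp only [pvRenderB, List.drop_one, List.headD_cons, List.tail_cons]
    exact foldl_zip_length w t h (hw h (by simp)) (fun r hr => hw r (by simp [hr]))

-- the main step-by-step simulation: A's fold state is the rendering of B's group state
theorem main_fold (w : Nat) (rest : List (List String)) :
    ∀ gs : List (List (List String)), gs ≠ [] → (∀ g ∈ gs, g ≠ []) →
      (∀ g ∈ gs, ∀ r ∈ g, r.length = w) → (∀ r ∈ rest, r.length = w) →
    rest.foldl (fun merged row =>
        let ne := pvNonEmptyA row 0
        if ne ≠ [] ∧ ne.length < w ∧ ne.length ≤ 2 then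
          merged.dropLast ++ [pvMergeIntoA (merged.getLastD []) row ne]
        else merged ++ [row]) (gs.map pvRenderB)
    = (rest.foldl (fun gs r =>
          let k := pvCountB r
          if 0 < k ∧ k < w ∧ k ≤ 2 then gs.dropLast ++ [gs.getLastD [] ++ [r]]
          else gs ++ [[r]]) gs).map pvRenderB := by
  induction rest with
  | nil => intro gs _ _ _ _; simp
  | cons row rest ih =>
    intro gs hne hgne hlen hrlen
    simp only [List.foldl_cons]
    have hcond : ((pvNonEmptyA row 0 ≠ [] ∧ (pvNonEmptyA row 0).length < w ∧ (pvNonEmptyA row 0).length ≤ 2))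
        ↔ (0 < pvCountB row ∧ pvCountB row < w ∧ pvCountB row ≤ 2) := by
      rw [← pvNonEmptyA_length row 0]
      constructor
      · rintro ⟨h1, h2, h3⟩
        exact ⟨List.length_pos_iff.mpr h1, h2, h3⟩
      · rintro ⟨h1, h2, h3⟩
        exact ⟨List.length_pos_iff.mp h1, h2, h3⟩
    rcases gs.eq_nil_or_concat with rfl | ⟨gs', glast, rfl⟩
    · exact absurd rfl hne
    simp only [List.concat_eq_append] at *
    by_cases hc : 0 < pvCountB row ∧ pvCountB row < w ∧ pvCountB row ≤ 2
    · rw [if_pos (hcond.mpr hc), if_pos hc]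
      have hglast : glast ≠ [] := hgne glast (by simp)
      have hglen : (pvRenderB glast).length = w :=
        pvRenderB_length glast w hglast (fun r hr => hlen glast (by simp) r hr)
      have hrowlen : row.length = w := hrlen row (by simp)
      have hmap_last : ((gs' ++ [glast]).map pvRenderB).getLastD [] = pvRenderB glast := by
        simp
      have hmap_drop : ((gs' ++ [glast]).map pvRenderB).dropLast = gs'.map pvRenderB := by
        simp
      rw [hmap_last, hmap_drop,
        pvMergeIntoA_eq_zipWith row (pvRenderB glast) (by rw [hglen, hrowlen]),
        ← pvRenderB_append glast row hglast]
      have : gs'.map pvRenderB ++ [pvRenderB (glast ++ [row])]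
          = ((gs' ++ [glast]).dropLast ++ [(gs' ++ [glast]).getLastD [] ++ [row]]).map pvRenderB := by
        simp
      rw [this]
      apply ih
      · simp
      · intro g hg
        simp only [List.dropLast_concat, List.getLastD_concat, List.mem_append, List.mem_singleton] at hg
        rcases hg with hg | rfl
        · exact hgne g (by simp [hg])
        · simp
      · intro g hg r hr
        simp only [List.dropLast_concat, List.getLastD_concat, List.mem_append, List.mem_singleton] at hg
        rcases hg with hg | rfl
        · exact hlen g (by simp [hg]) r hr
        · rcases List.mem_append.mp hr with hr | hr
          · exact hlen glast (by simp) r hr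
          · simp only [List.mem_singleton] at hr; rw [hr]; exact hrlen _ (by simp)
      · intro r hr; exact hrlen r (by simp [hr])
    · rw [if_neg (fun h => hc (hcond.mp h)), if_neg hc]
      have : (gs' ++ [glast]).map pvRenderB ++ [row]
          = ((gs' ++ [glast]) ++ [[row]]).map pvRenderB := by
        simp [pvRenderB_singleton]
      rw [this]
      apply ih
      · simp
      · intro g hg
        rcases List.mem_append.mp hg with hg | hg
        · exact hgne g hg
        · simp only [List.mem_singleton] at hg; subst hg; simp
      · intro g hg r hr
        rcases List.mem_append.mp hg with hg | hg
        · exact hlen g hg r hr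
        · simp only [List.mem_singleton] at hg; subst hg
          simp only [List.mem_singleton] at hr; rw [hr]
          exact hrlen _ (by simp)
      · intro r hr; exact hrlen r (by simp [hr])

theorem foldl_append_eq_map (f : List String → List String) (rows acc : List (List String)) :
    rows.foldl (fun acc row => acc ++ [f row]) acc = acc ++ rows.map f := by
  induction rows generalizing acc with
  | nil => simp
  | cons r rs ih => simp [ih]

theorem norm_length (w : Nat) (row : List String) :
    (row.take w ++ List.replicate (w - (row.take w).length) "").length = w := by
  simp only [List.length_append, List.length_replicate, List.length_take]
  omega

-- ===== VERDICT (by name: the statement is the Claim_ definition above) =====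
theorem merge_wrapped_box_rows_py_spec : Claim_equal_merge_wrapped_box_rows_py := by
  intro rows _
  show merge_wrapped_box_rows_py rows = merge_wrapped_box_rows_py_alt rows
  cases rows with
  | nil => rfl
  | cons r0 tl =>
    simp only [merge_wrapped_box_rows_py, merge_wrapped_box_rows_py_alt]
    rw [foldl_append_eq_map]
    simp only [List.nil_append, List.map_cons]
    have := main_fold r0.length
      ((tl.map (fun row => row.take r0.length ++ List.replicate (r0.length - (row.take r0.length).length) "")))
      [[r0.take r0.length ++ List.replicate (r0.length - (r0.take r0.length).length) ""]]
      (by simp) (by simp)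
      (by intro g hg r hr
          simp only [List.mem_singleton] at hg; subst hg
          simp only [List.mem_singleton] at hr; rw [hr]
          exact norm_length _ _)
      (by intro r hr; rcases List.mem_map.mp hr with ⟨x, _, rfl⟩; exact norm_length _ _)
    simpa [pvRenderB_singleton] using this
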